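-- pv_equiv track=rewrite | github.com/AppyPt/multiagent | brainstorm/meeting.py | _fuzzy_match_speaker
-- ===== SOURCE A (Python) =====
-- from typing import Awaitable, Callable, Dict, Any, List
--
-- def _fuzzy_match_speaker(
--     name: str | None, valid_names: List[str]
-- ) -> str | None:
--     """
--     Tenta resolver um nome (possivelmente truncado ou incompleto)
--     para um dos nomes válidos de especialista.
--     """  # FIX #3
--     if not name:
--         return None
--     name_lower = name.strip().lower()
--     # match exato
--     for valid in valid_names:
--         if name_lower == valid.lower():
--             return valid
--     # match parcial (o nome devolvido está contido no nome válido, ou vice-versa)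
--     for valid in valid_names:
--         if name_lower in valid.lower() or valid.lower().startswith(name_lower):
--             return valid
--     return None
-- ===== SOURCE B (Python) =====
-- def _fuzzy_match_speaker(name, valid_names):
--     if not name:
--         return None
--     name_lower = name.strip().lower()
--     candidate = None
--     for valid in valid_names:
--         v = valid.lower()
--         if v == name_lower:
--             return valid  # exact match always wins
--         if candidate is None and name_lower in v:
--             candidate = valid  # remember first partial match, keep scanning
--     return candidate
-- ===== Notes on version B (the rewrite author's own statement) =====
-- stated objective: simpler
-- what changed: Single pass over valid_names carrying a first-partial-match candidate (exact match returns immediately, candidate returned after the scan) instead of two full passes, and the redundant startswith test (implied by substring containment) is dropped — each valid name is lowercased once.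
import Mathlib
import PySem

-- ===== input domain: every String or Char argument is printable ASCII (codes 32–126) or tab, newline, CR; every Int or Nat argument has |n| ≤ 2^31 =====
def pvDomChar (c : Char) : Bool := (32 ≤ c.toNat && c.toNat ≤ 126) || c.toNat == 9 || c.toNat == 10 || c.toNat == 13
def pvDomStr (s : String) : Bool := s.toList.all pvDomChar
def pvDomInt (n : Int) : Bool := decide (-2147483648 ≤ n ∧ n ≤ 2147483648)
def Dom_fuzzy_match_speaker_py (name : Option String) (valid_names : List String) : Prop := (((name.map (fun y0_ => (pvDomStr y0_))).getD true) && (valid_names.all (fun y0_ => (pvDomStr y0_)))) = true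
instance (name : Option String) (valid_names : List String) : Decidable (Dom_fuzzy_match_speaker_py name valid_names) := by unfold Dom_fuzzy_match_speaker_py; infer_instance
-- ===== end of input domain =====

-- B: one pass over valid_names carrying a first-partial-match candidate (exact match returns
-- immediately; the redundant startswith test is dropped), instead of A's two full passes.

-- ===== PORT A =====
-- A's first loop: return the first valid whose lowercase equals name_lower
def pvAExact (name_lower : String) : List String → Option String
  | [] => none
  | valid :: rest =>
    if name_lower == PySem.Str.lower valid then some valid
    else pvAExact name_lower rest

-- A's second loop: first valid with name_lower in valid.lower() or valid.lower().startswith(name_lower)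
def pvAPartial (name_lower : String) : List String → Option String
  | [] => none
  | valid :: rest =>
    if PySem.Str.isIn name_lower (PySem.Str.lower valid)
       || PySem.Str.startswith (PySem.Str.lower valid) name_lower then some valid
    else pvAPartial name_lower rest

def fuzzy_match_speaker_py (name : Option String) (valid_names : List String) : Option String :=
  match name with
  | none => none
  | some n =>
    if n == "" then none
    else
      let name_lower := PySem.Str.lower (PySem.Str.strip n)
      match pvAExact name_lower valid_names with
      | some v => some v
      | none => pvAPartial name_lower valid_names

-- ===== PORT B =====
-- B's single loop with the running candidate (candidate is returned only after the whole scan)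
def pvBLoop (name_lower : String) (candidate : Option String) : List String → Option String
  | [] => candidate
  | valid :: rest =>
    let v := PySem.Str.lower valid
    if v == name_lower then some valid
    else if candidate.isNone && PySem.Str.isIn name_lower v then
      pvBLoop name_lower (some valid) rest
    else pvBLoop name_lower candidate rest

def fuzzy_match_speaker_py_alt (name : Option String) (valid_names : List String) : Option String :=
  match name with
  | none => none
  | some n =>
    if n == "" then none
    else
      let name_lower := PySem.Str.lower (PySem.Str.strip n)
      pvBLoop name_lower none valid_names

-- ===== PRECONDITION & SPEC =====
def Spec_fuzzy_match_speaker_py (name : Option String) (valid_names : List String) (out : Option String) : Prop := out = fuzzy_match_speaker_py_alt name valid_names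
instance (name : Option String) (valid_names : List String) (out : Option String) : Decidable (Spec_fuzzy_match_speaker_py name valid_names out) := by unfold Spec_fuzzy_match_speaker_py; infer_instance

-- ===== CLAIM (what is proved, stated in full; the proofs are below) =====
def Claim_equal_fuzzy_match_speaker_py : Prop := ∀ (name : Option String) (valid_names : List String), Dom_fuzzy_match_speaker_py name valid_names → Spec_fuzzy_match_speaker_py name valid_names (fuzzy_match_speaker_py name valid_names)

-- ===== LEMMAS AND PROOFS =====

-- startswith implies substring containment, so A's partial predicate collapses to isIn
theorem pv_start_imp (nl lv : List Char) :
    PySem.Chars.startswith lv nl = true → PySem.Chars.isIn nl lv = true := by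
  intro h
  exact (PySem.Chars.isIn_iff_infix _ _).mpr ((PySem.Chars.startswith_iff _ _).mp h).isInfix

-- B's loop in terms of A's two loops and the incoming candidate
theorem pvBLoop_eq (nl : String) (l : List String) (cand : Option String) :
    pvBLoop nl cand l =
      match pvAExact nl l, cand with
      | some v, _ => some v
      | none, some c => some c
      | none, none => pvAPartial nl l := by
  induction l generalizing cand with
  | nil => cases cand <;> simp [pvBLoop, pvAExact, pvAPartial]
  | cons valid rest ih =>
    by_cases hex : PySem.Str.lower valid = nl
    · simp [pvBLoop, pvAExact, hex]
    · have hex' : ¬ nl = PySem.Str.lower valid := fun h => hex h.symm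
      cases cand with
      | some c =>
        simp only [pvBLoop, pvAExact, pvAPartial, hex, hex', beq_iff_eq,
          Option.isNone_some, Bool.false_and, if_false, ih]
        cases he : pvAExact nl rest <;> simp
      | none =>
        cases hp : PySem.Chars.isIn nl.toList (PySem.Chars.lower valid.toList) with
        | true =>
          simp only [pvBLoop, pvAExact, pvAPartial, ih]
          cases he : pvAExact nl rest <;> simp [hex, hex', hp]
        | false =>
          have hs : PySem.Chars.startswith (PySem.Chars.lower valid.toList) nl.toList = false := by
            cases hst : PySem.Chars.startswith (PySem.Chars.lower valid.toList) nl.toList with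
            | false => rfl
            | true => rw [pv_start_imp _ _ hst] at hp; exact hp
          simp [pvBLoop, pvAExact, pvAPartial, hex, hex', hp, hs, ih]

-- ===== VERDICT (by name: the statement is the Claim_ definition above) =====
theorem fuzzy_match_speaker_py_spec : Claim_equal_fuzzy_match_speaker_py := by
  intro name valid_names _
  unfold Spec_fuzzy_match_speaker_py fuzzy_match_speaker_py fuzzy_match_speaker_py_alt
  cases name with
  | none => rfl
  | some n =>
    by_cases hn : n == ""
    · simp [hn]
    · simp only [hn, if_neg, Bool.not_eq_true]
      rw [pvBLoop_eq]
      cases h : pvAExact (PySem.Str.lower (PySem.Str.strip n)) valid_names <;> simp
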